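-- pv_equiv track=rewrite | github.com/ajwoong/CodingTest | 프로그래머스(sol) - 숫자게임.py | solution
-- ===== SOURCE A (Python) =====
-- from collections import deque
--
-- def solution(A, B):
--
--     A.sort()
--     B.sort()
--
--     A = deque(A)
--     B = deque(B)
--
--     answer = 0
--     while A and B:
--         if(B[-1] > A[-1]):
--             A.pop()
--             B.pop()
--             answer += 1
--         else:
--             A.pop()
--             B.popleft()
--
--     return answer
-- ===== SOURCE B (Python) =====
-- def solution(A, B):
--     A.sort()
--     B.sort()
--     # A's process only ever contests the largest min(len(A), len(B)) elements of A
--     i = len(A) - min(len(A), len(B))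
--     answer = 0
--     for b in B:
--         if i < len(A) and b > A[i]:
--             i += 1
--             answer += 1
--     return answer
-- ===== Notes on version B (the rewrite author's own statement) =====
-- stated objective: simpler
-- what changed: Replaces the deque with pops at both ends and a back-to-front while-loop by a single forward for-loop over sorted B with one index into sorted A, started past the len(A)-min(len(A),len(B)) smallest elements of A, which the original process never contests.
import Mathlib
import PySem

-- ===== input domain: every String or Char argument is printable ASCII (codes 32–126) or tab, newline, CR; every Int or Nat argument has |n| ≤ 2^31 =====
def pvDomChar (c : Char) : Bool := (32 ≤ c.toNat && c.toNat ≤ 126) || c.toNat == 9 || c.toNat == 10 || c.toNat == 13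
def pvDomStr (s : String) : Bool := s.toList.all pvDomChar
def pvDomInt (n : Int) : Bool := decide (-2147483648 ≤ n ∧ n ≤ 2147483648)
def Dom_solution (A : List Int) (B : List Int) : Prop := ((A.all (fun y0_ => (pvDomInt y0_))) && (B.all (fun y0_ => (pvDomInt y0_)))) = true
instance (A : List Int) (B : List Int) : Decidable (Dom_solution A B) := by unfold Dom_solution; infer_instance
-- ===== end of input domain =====

-- B replaces A's deque with double-ended pops and back-to-front while-loop by a single
-- forward for-loop over sorted B with one index into sorted A (objective: simpler).
-- Both A and B sort the caller's lists in place; the equivalence proved is about the return value.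

-- ===== PORT A =====
-- the while loop: state (A, B, answer); A pops from the back each iteration, B pops
-- from the back on a win and from the front otherwise
def solLoopA : List Int → List Int → Int → Int
  | [], _, ans => ans
  | _ :: _, [], ans => ans
  | x :: as_, y :: bs, ans =>
      if (y :: bs).getLast (List.cons_ne_nil _ _) > (x :: as_).getLast (List.cons_ne_nil _ _) then
        solLoopA (x :: as_).dropLast (y :: bs).dropLast (ans + 1)
      else
        solLoopA (x :: as_).dropLast (y :: bs).tail ans
  termination_by a _ _ => a.length
  decreasing_by all_goals simp [List.length_dropLast]

def solution (A : List Int) (B : List Int) : Int :=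
  solLoopA (PySem.List.sorted A (fun x => x) false) (PySem.List.sorted B (fun x => x) false) 0

-- ===== PORT B =====
-- the for-loop over B: state (i, answer)
def solLoopB (a : List Int) : List Int → Nat → Int → Int
  | [], _, ans => ans
  | b :: bs, i, ans =>
      if i < a.length ∧ b > a.getD i 0 then
        solLoopB a bs (i + 1) (ans + 1)
      else
        solLoopB a bs i ans

def solution_alt (A : List Int) (B : List Int) : Int :=
  let sa := PySem.List.sorted A (fun x => x) false
  let sb := PySem.List.sorted B (fun x => x) false
  solLoopB sa sb (sa.length - min sa.length sb.length) 0

-- ===== PRECONDITION & SPEC =====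
def Spec_solution (A : List Int) (B : List Int) (out : Int) : Prop := out = solution_alt A B
instance (A : List Int) (B : List Int) (out : Int) : Decidable (Spec_solution A B out) := by unfold Spec_solution; infer_instance

-- ===== CLAIM (what is proved, stated in full; the proofs are below) =====
def Claim_equal_solution : Prop := ∀ (A : List Int) (B : List Int), Dom_solution A B → Spec_solution A B (solution A B)

-- ===== LEMMAS AND PROOFS =====

-- the greedy front-to-front match count both loops compute
def gMatch : List Int → List Int → Int
  | _, [] => 0
  | [], _ :: _ => 0
  | x :: a, y :: b => if y > x then 1 + gMatch a b else gMatch (x :: a) b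

theorem gMatch_nil_left (b : List Int) : gMatch [] b = 0 := by
  cases b <;> simp [gMatch]

theorem gMatch_nil_right (a : List Int) : gMatch a [] = 0 := by
  cases a <;> simp [gMatch]

-- loop B computes gMatch on the suffix of a starting at i
theorem solLoopB_eq_gMatch (a : List Int) (b : List Int) :
    ∀ (i : Nat) (ans : Int), solLoopB a b i ans = ans + gMatch (a.drop i) b := by
  induction b with
  | nil => intro i ans; simp [solLoopB, gMatch_nil_right]
  | cons y bs ih =>
    intro i ans
    by_cases hi : i < a.length
    · have hdrop : a.drop i = a[i] :: a.drop (i + 1) := List.drop_eq_getElem_cons hi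
      have hgd : a.getD i 0 = a[i] := List.getD_eq_getElem a 0 hi
      by_cases hy : y > a.getD i 0
      · rw [solLoopB, if_pos ⟨hi, hy⟩, ih, hdrop]
        rw [hgd] at hy
        simp [gMatch, hy]; ring
      · rw [solLoopB, if_neg (fun h => hy h.2), ih, hdrop]
        rw [hgd] at hy
        simp [gMatch, hy]
    · have hdrop : a.drop i = [] := List.drop_eq_nil_of_le (by omega)
      rw [solLoopB, if_neg (fun h => hi h.1), ih, hdrop, gMatch_nil_left, gMatch_nil_left]

-- L3: an element no b can beat, appended at the back of a, never matches
theorem gMatch_append_unbeatable (x : Int) :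
    ∀ (b c : List Int), (∀ e ∈ b, e ≤ x) → gMatch (c ++ [x]) b = gMatch c b := by
  intro b
  induction b with
  | nil => intro c _; simp [gMatch_nil_right]
  | cons y bs ih =>
    intro c hb
    cases c with
    | nil =>
      have hy : ¬ (y > x) := by have := hb y (by simp); omega
      simp only [List.nil_append, gMatch, if_neg hy, gMatch_nil_left]
      have h0 := ih [] (fun e he => hb e (by simp [he]))
      simp only [List.nil_append, gMatch_nil_left] at h0
      exact h0
    | cons z c' =>
      by_cases hyz : y > z
      · simp only [List.cons_append, gMatch, if_pos hyz]
        rw [ih c' (fun e he => hb e (by simp [he]))]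
      · simp only [List.cons_append, gMatch, if_neg hyz]
        exact ih (z :: c') (fun e he => hb e (by simp [he]))

-- L4: with strictly more b's than slots, the smallest b is wasted anyway
theorem gMatch_tail :
    ∀ (b c : List Int), b.Sorted (· ≤ ·) → c.length < b.length →
      gMatch c b = gMatch c b.tail := by
  intro b
  induction b with
  | nil => intro c _ h; simp at h
  | cons y bs ih =>
    intro c hs hlen
    simp only [List.tail_cons]
    cases c with
    | nil => rw [gMatch_nil_left, gMatch_nil_left]
    | cons z c' =>
      by_cases hyz : y > z
      · have hbs : ∀ e ∈ bs, z < e := fun e he =>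
          lt_of_lt_of_le hyz ((List.sorted_cons.mp hs).1 e he)
        rw [gMatch, if_pos hyz]
        cases bs with
        | nil => simp at hlen
        | cons y1 bs' =>
          have hy1 : y1 > z := hbs y1 (by simp)
          rw [gMatch, if_pos hy1]
          have : gMatch c' (y1 :: bs') = gMatch c' bs' := by
            have := ih c' (List.sorted_cons.mp hs).2 (by simp at hlen ⊢; omega)
            simpa using this
          rw [this]
      · rw [gMatch, if_neg hyz]

-- L1: a fresh maximum pair with y > x adds exactly one win
theorem gMatch_append_pair (x y : Int) (hxy : y > x) :
    ∀ (bs c : List Int), (∀ e ∈ c, e ≤ x) →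
      gMatch (c ++ [x]) (bs ++ [y]) = 1 + gMatch c bs := by
  intro bs
  induction bs with
  | nil =>
    intro c hc
    cases c with
    | nil => simp [gMatch, hxy]
    | cons z c' =>
      have hz : y > z := lt_of_le_of_lt (hc z (by simp)) hxy
      simp only [List.cons_append, List.nil_append, gMatch, if_pos hz]
  | cons w bs' ih =>
    intro c hc
    cases c with
    | nil =>
      have h0 := ih [] (by simp)
      simp only [List.nil_append] at h0 ⊢
      rw [gMatch_nil_left]
      by_cases hw : w > x
      · rw [List.cons_append, gMatch, if_pos hw, gMatch_nil_left]
      · rw [List.cons_append, gMatch, if_neg hw, h0, gMatch_nil_left]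
    | cons z c' =>
      by_cases hwz : w > z
      · simp only [List.cons_append, gMatch, if_pos hwz]
        rw [ih c' (fun e he => hc e (by simp [he]))]
      · simp only [List.cons_append, gMatch, if_neg hwz]
        exact ih (z :: c') hc

-- last of a sorted list bounds every element
theorem sorted_le_getLast :
    ∀ (a : List Int), a.Sorted (· ≤ ·) → ∀ (h : a ≠ []) (e : Int), e ∈ a → e ≤ a.getLast h := by
  intro a
  induction a with
  | nil => intro _ h; simp at h
  | cons z t ih =>
    intro hs h e he
    cases t with
    | nil => simp at he; simp [he, List.getLast]
    | cons w t' =>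
      rw [List.getLast_cons (by simp)]
      rcases List.mem_cons.mp he with rfl | he'
      · calc e ≤ w := (List.sorted_cons.mp hs).1 w (by simp)
          _ ≤ (w :: t').getLast (by simp) :=
            ih (List.sorted_cons.mp hs).2 (by simp) w (by simp)
      · exact ih (List.sorted_cons.mp hs).2 (by simp) e he'

-- the master invariant: loop A computes gMatch of the top-min(|a|,|b|) slice of a against b
theorem solLoopA_eq_gMatch :
    ∀ (n : Nat) (a b : List Int), a.length = n → a.Sorted (· ≤ ·) → b.Sorted (· ≤ ·) →
      ∀ ans, solLoopA a b ans = ans + gMatch (a.drop (a.length - b.length)) b := by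
  intro n
  induction n using Nat.strong_induction_on with
  | _ n ih =>
    intro a b hn hsa hsb ans
    match a, b with
    | [], b => simp [solLoopA, gMatch_nil_left]
    | x0 :: as0, [] => simp [solLoopA, gMatch_nil_right]
    | x0 :: as0, y0 :: bs0 =>
      set a := x0 :: as0 with ha
      set b := y0 :: bs0 with hb
      have hane : a ≠ [] := by simp [ha]
      have hbne : b ≠ [] := by simp [hb]
      have hadl : a.dropLast ++ [a.getLast hane] = a := List.dropLast_append_getLast hane
      have hbdl : b.dropLast ++ [b.getLast hbne] = b := List.dropLast_append_getLast hbne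
      have hlen_a : a.dropLast.length = a.length - 1 := List.length_dropLast
      have hlen_b : b.dropLast.length = b.length - 1 := List.length_dropLast
      have hlen_bt : b.tail.length = b.length - 1 := List.length_tail
      have halen : 1 ≤ a.length := by simp [ha]
      have hblen : 1 ≤ b.length := by simp [hb]
      have hsadl : a.dropLast.Sorted (· ≤ ·) := List.Pairwise.sublist (List.dropLast_sublist a) hsa
      have hsbdl : b.dropLast.Sorted (· ≤ ·) := List.Pairwise.sublist (List.dropLast_sublist b) hsb
      have hsbt : b.tail.Sorted (· ≤ ·) := List.Pairwise.sublist (List.tail_sublist b) hsb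
      set d := a.length - b.length with hd
      have hd_le : d ≤ a.dropLast.length := by omega
      have hdrop_split : a.drop d = a.dropLast.drop d ++ [a.getLast hane] := by
        conv_lhs => rw [← hadl, List.drop_append_of_le_length hd_le]
      rw [solLoopA]
      split_ifs with hcmp
      · -- win: pop both backs
        rw [ih (a.dropLast.length) (by omega) a.dropLast b.dropLast rfl hsadl hsbdl]
        have hdd : a.dropLast.length - b.dropLast.length = d := by omega
        rw [hdd, hdrop_split]
        conv_rhs => rw [← hbdl]
        rw [gMatch_append_pair (a.getLast hane) (b.getLast hbne) hcmp _ _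
          (fun e he => sorted_le_getLast a hsa hane e
            ((List.dropLast_sublist a).subset (List.mem_of_mem_drop he)))]
        ring
      · -- loss: pop a's back and b's front
        rw [ih (a.dropLast.length) (by omega) a.dropLast b.tail rfl hsadl hsbt]
        have hdd : a.dropLast.length - b.tail.length = d := by omega
        rw [hdd, hdrop_split]
        have hble : ∀ e ∈ b, e ≤ a.getLast hane := by
          intro e he
          calc e ≤ b.getLast hbne := sorted_le_getLast b hsb hbne e he
            _ ≤ a.getLast hane := not_lt.mp hcmp
        rw [gMatch_append_unbeatable (a.getLast hane) b _ hble]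
        rw [gMatch_tail b _ hsb (by rw [List.length_drop]; omega)]

theorem drop_min_eq (a b : List Int) :
    a.length - min a.length b.length = a.length - b.length := by omega

-- ===== VERDICT (by name: the statement is the Claim_ definition above) =====
theorem solution_spec : Claim_equal_solution := by
  intro A B _
  unfold Spec_solution solution solution_alt
  rw [solLoopB_eq_gMatch, drop_min_eq]
  rw [solLoopA_eq_gMatch (PySem.List.sorted A (fun x => x) false).length _ _ rfl
      (PySem.List.sorted_pairwise ..) (PySem.List.sorted_pairwise ..)]
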